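-- pv_equiv track=rewrite | github.com/Dohun-Yi/churu_analysis | public_data_reauthentication/3_analysis_data/3_country_institute/3_get_institute_name_GPT.py | crawler
-- ===== SOURCE A (Python) =====
-- def crawler(child2parents, child):
--     if child in child2parents:
--         parents = child2parents[child]
--         hierarchy = []
--         for parent in parents:
--             hierarchy += [parent] + crawler(child2parents, parent)
--         return hierarchy
--     else:
--         return []
-- ===== SOURCE B (Python) =====
-- def crawler(child2parents, child):
--     # Memoized DFS: each node's ancestor-hierarchy list is computed once and reused.
--     memo = {}
--
--     def dfs(node):
--         if node in memo:
--             return memo[node]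
--         res = []
--         if node in child2parents:
--             for parent in child2parents[node]:
--                 res.append(parent)
--                 res.extend(dfs(parent))
--         memo[node] = res
--         return res
--
--     return dfs(child)
-- ===== Notes on version B (the rewrite author's own statement) =====
-- stated objective: alternative
-- what changed: B memoizes each node's computed hierarchy list in a dict so every node's ancestor list is built once and reused, instead of A's naive recursion that re-descends the subgraph at every occurrence of a shared parent; on the random timing inputs this was not measurably faster.
import Mathlib
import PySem

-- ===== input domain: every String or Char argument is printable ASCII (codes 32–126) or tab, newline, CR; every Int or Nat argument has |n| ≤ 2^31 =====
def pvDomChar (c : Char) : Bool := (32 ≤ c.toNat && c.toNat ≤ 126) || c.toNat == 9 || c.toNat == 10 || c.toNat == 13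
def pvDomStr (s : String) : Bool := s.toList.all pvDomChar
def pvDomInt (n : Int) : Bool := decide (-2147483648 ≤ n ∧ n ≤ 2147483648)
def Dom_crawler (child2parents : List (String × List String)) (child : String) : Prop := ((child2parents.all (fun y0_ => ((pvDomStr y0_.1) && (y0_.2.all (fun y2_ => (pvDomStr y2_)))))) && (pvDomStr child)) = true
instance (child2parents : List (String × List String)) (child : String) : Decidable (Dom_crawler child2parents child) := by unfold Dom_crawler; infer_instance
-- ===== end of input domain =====

-- B replaces A's naive re-descent by a memoized DFS (each node's hierarchy
-- list computed once and reused); same return value, different algorithm.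

-- ===== PORT A =====
-- fuel-totalized literal port of A's recursion; fuel (length+1) is never
-- exhausted on inputs satisfying Pre_ (no parent-chain of length length+1)
def crawlerFuel (m : List (String × List String)) : Nat → String → List String
  | 0, _ => []
  | n+1, child =>
    match m.lookup child with
    | some parents => parents.foldl (fun h p => h ++ p :: crawlerFuel m n p) []
    | none => []

def crawler (child2parents : List (String × List String)) (child : String) : List String :=
  crawlerFuel child2parents (child2parents.length + 1) child

-- ===== PORT B =====
-- literal port of Source B: DFS with a memo dict threaded through; same fuel totalization
def dfsMemo (m : List (String × List String)) :
    Nat → String → PySem.Dict String (List String) →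
    List String × PySem.Dict String (List String)
  | 0, _, memo => ([], memo)
  | n+1, node, memo =>
    match PySem.Dict.get? memo node with
    | some r => (r, memo)
    | none =>
      let rm :=
        match m.lookup node with
        | some parents =>
          parents.foldl (fun (acc : List String × PySem.Dict String (List String)) p =>
            let pr := dfsMemo m n p acc.2
            (acc.1 ++ p :: pr.1, pr.2)) (([] : List String), memo)
        | none => ([], memo)
      (rm.1, PySem.Dict.insert rm.2 node rm.1)

def crawler_alt (child2parents : List (String × List String)) (child : String) : List String :=
  (dfsMemo child2parents (child2parents.length + 1) child PySem.Dict.empty).1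

-- ===== PRECONDITION & SPEC =====
-- endpoints of parent-link paths of length exactly k starting at c
def chains (m : List (String × List String)) : Nat → String → List String
  | 0, c => [c]
  | k+1, c => ((m.lookup c).getD []).flatMap (chains m k)

-- Pre_ excludes (a) assoc lists with duplicate keys, where the Python-dict collapse
-- (last value wins) makes the assoc-list representation ambiguous, and (b) inputs with
-- a parent-chain of length length+1 from child (a reachable cycle), on which A's
-- recursion never terminates (Python raises RecursionError; B likewise).
def Pre_crawler (child2parents : List (String × List String)) (child : String) : Prop :=
  (child2parents.map Prod.fst).Nodup ∧
  chains child2parents (child2parents.length + 1) child = []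
instance (child2parents : List (String × List String)) (child : String) : Decidable (Pre_crawler child2parents child) := by unfold Pre_crawler; infer_instance

def pvWitness_crawler : (List (String × List String)) × String :=
  ([("a", ["b", "c"]), ("b", ["c"])], "a")

def Spec_crawler (child2parents : List (String × List String)) (child : String) (out : List String) : Prop := out = crawler_alt child2parents child
instance (child2parents : List (String × List String)) (child : String) (out : List String) : Decidable (Spec_crawler child2parents child out) := by unfold Spec_crawler; infer_instance

-- ===== CLAIM (what is proved, stated in full; the proofs are below) =====
def Claim_equal_crawler : Prop := ∀ (child2parents : List (String × List String)) (child : String), Dom_crawler child2parents child → Pre_crawler child2parents child → Spec_crawler child2parents child (crawler child2parents child)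

-- ===== LEMMAS AND PROOFS =====

theorem chains_succ_eq (m : List (String × List String)) (k : Nat) (c : String) :
    chains m (k+1) c = (chains m k c).flatMap (fun x => (m.lookup x).getD []) := by
  induction k generalizing c with
  | zero => simp [chains]
  | succ k ih =>
    show ((m.lookup c).getD []).flatMap (chains m (k+1))
        = (((m.lookup c).getD []).flatMap (chains m k)).flatMap (fun x => (m.lookup x).getD [])
    rw [List.flatMap_assoc]
    exact List.flatMap_congr (fun p _ => ih p)

theorem chains_mono (m : List (String × List String)) (k : Nat) (c : String)
    (h : chains m k c = []) : chains m (k+1) c = [] := by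
  rw [chains_succ_eq, h]; rfl

theorem chains_add (m : List (String × List String)) (k d : Nat) (c : String)
    (h : chains m k c = []) : chains m (k+d) c = [] := by
  induction d with
  | zero => exact h
  | succ d ih => exact chains_mono m (k+d) c ih

theorem chains_mem (m : List (String × List String)) (k : Nat) (c p : String)
    (hp : p ∈ (m.lookup c).getD []) (h : chains m (k+1) c = []) :
    chains m k p = [] := by
  have : ((m.lookup c).getD []).flatMap (chains m k) = [] := h
  rw [List.flatMap_eq_nil_iff] at this
  exact this p hp

-- foldl extensionality over list members for the hierarchy-building step
theorem foldl_hier_ext (F G : String → List String)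
    (ps : List String) (h : ∀ p ∈ ps, F p = G p) (acc : List String) :
    ps.foldl (fun a p => a ++ p :: F p) acc = ps.foldl (fun a p => a ++ p :: G p) acc := by
  induction ps generalizing acc with
  | nil => rfl
  | cons q qs ih =>
    simp only [List.foldl_cons]
    rw [h q (by simp)]
    exact ih (fun p hp => h p (by simp [hp])) _

theorem crawlerFuel_succ (m : List (String × List String)) (f : Nat) (c : String)
    (h : chains m f c = []) : crawlerFuel m (f+1) c = crawlerFuel m f c := by
  induction f generalizing c with
  | zero => simp [chains] at h
  | succ k ih =>
    show (match m.lookup c with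
          | some parents => parents.foldl (fun h p => h ++ p :: crawlerFuel m (k+1) p) []
          | none => []) =
         (match m.lookup c with
          | some parents => parents.foldl (fun h p => h ++ p :: crawlerFuel m k p) []
          | none => [])
    cases hm : m.lookup c with
    | none => rfl
    | some ps =>
      have hps : ∀ p ∈ ps, chains m k p = [] := by
        intro p hp
        exact chains_mem m k c p (by rw [hm]; exact hp) h
      exact foldl_hier_ext _ _ ps (fun p hp => ih p (hps p hp)) []

theorem crawlerFuel_ge (m : List (String × List String)) (f g : Nat) (c : String)
    (h : chains m f c = []) (hfg : f ≤ g) : crawlerFuel m g c = crawlerFuel m f c := by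
  obtain ⟨d, rfl⟩ := Nat.exists_eq_add_of_le hfg
  induction d with
  | zero => rfl
  | succ d ih =>
    have h1 : f + (d+1) = (f + d) + 1 := rfl
    rw [h1, crawlerFuel_succ m (f+d) c (chains_add m f d c h),
        ih (Nat.le_add_right f d)]

def MemoGood (m : List (String × List String)) (memo : PySem.Dict String (List String)) : Prop :=
  ∀ k v, PySem.Dict.get? memo k = some v → v = crawler m k

theorem memoGood_empty (m : List (String × List String)) :
    MemoGood m PySem.Dict.empty := by
  intro k v h
  simp [PySem.Dict.get?_empty] at h

theorem memoGood_insert (m : List (String × List String))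
    (memo : PySem.Dict String (List String)) (c : String) (v : List String)
    (hg : MemoGood m memo) (hv : v = crawler m c) :
    MemoGood m (PySem.Dict.insert memo c v) := by
  intro k w hk
  rw [PySem.Dict.get?_insert] at hk
  by_cases hkc : k = c
  · simp [hkc] at hk; subst hkc; rw [← hk]; exact hv
  · simp [hkc] at hk; exact hg k w hk

-- the foldl in dfsMemo computes the same hierarchy as A's foldl, given the
-- inductive hypothesis for fuel k on each parent
theorem foldMemo_spec (m : List (String × List String)) (k : Nat)
    (IH : ∀ c memo, chains m k c = [] → MemoGood m memo →
      (dfsMemo m k c memo).1 = crawler m c ∧ MemoGood m (dfsMemo m k c memo).2) :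
    ∀ (ps : List String) (acc : List String) (memo : PySem.Dict String (List String)),
      (∀ p ∈ ps, chains m k p = []) → MemoGood m memo →
      (ps.foldl (fun acc p =>
          let pr := dfsMemo m k p acc.2
          (acc.1 ++ p :: pr.1, pr.2)) (acc, memo)).1
        = ps.foldl (fun a p => a ++ p :: crawler m p) acc ∧
      MemoGood m (ps.foldl (fun acc p =>
          let pr := dfsMemo m k p acc.2
          (acc.1 ++ p :: pr.1, pr.2)) (acc, memo)).2 := by
  intro ps
  induction ps with
  | nil => intro acc memo _ hg; exact ⟨rfl, hg⟩
  | cons q qs ih =>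
    intro acc memo hps hg
    have hq := IH q memo (hps q (by simp)) hg
    simp only [List.foldl_cons]
    rw [hq.1]
    exact ih (acc ++ q :: crawler m q) (dfsMemo m k q memo).2
      (fun p hp => hps p (by simp [hp])) hq.2

theorem dfsMemo_spec (m : List (String × List String)) :
    ∀ (f : Nat), f ≤ m.length + 1 →
    ∀ (c : String) (memo : PySem.Dict String (List String)),
      chains m f c = [] → MemoGood m memo →
      (dfsMemo m f c memo).1 = crawler m c ∧ MemoGood m (dfsMemo m f c memo).2 := by
  intro f
  induction f with
  | zero => intro _ c memo hc _; simp [chains] at hc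
  | succ k ihf =>
    intro hle c memo hc hg
    have ihk : ∀ c memo, chains m k c = [] → MemoGood m memo →
        (dfsMemo m k c memo).1 = crawler m c ∧ MemoGood m (dfsMemo m k c memo).2 :=
      fun c memo h1 h2 => ihf (Nat.le_of_succ_le hle) c memo h1 h2
    have hcraw : crawler m c = crawlerFuel m (k+1) c := by
      unfold crawler
      exact crawlerFuel_ge m (k+1) (m.length+1) c hc hle
    cases hmemo : PySem.Dict.get? memo c with
    | some r =>
      refine ⟨?_, ?_⟩
      · show (dfsMemo m (k+1) c memo).1 = crawler m c
        simp only [dfsMemo, hmemo]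
        exact hg c r hmemo
      · show MemoGood m (dfsMemo m (k+1) c memo).2
        simp only [dfsMemo, hmemo]
        exact hg
    | none =>
      cases hm : m.lookup c with
      | none =>
        have hc0 : crawler m c = [] := by
          rw [hcraw]
          show (match m.lookup c with
                | some parents => parents.foldl (fun h p => h ++ p :: crawlerFuel m k p) []
                | none => []) = []
          rw [hm]
        simp only [dfsMemo, hmemo, hm]
        exact ⟨hc0.symm, memoGood_insert m memo c [] hg hc0.symm⟩
      | some ps =>
        have hps : ∀ p ∈ ps, chains m k p = [] := by
          intro p hp
          exact chains_mem m k c p (by rw [hm]; exact hp) hc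
        have hfold := foldMemo_spec m k ihk ps [] memo hps hg
        have hcval : crawler m c = ps.foldl (fun a p => a ++ p :: crawler m p) [] := by
          rw [hcraw]
          show (match m.lookup c with
                | some parents => parents.foldl (fun h p => h ++ p :: crawlerFuel m k p) []
                | none => []) = _
          rw [hm]
          apply foldl_hier_ext
          intro p hp
          exact (crawlerFuel_ge m k (m.length+1) p (hps p hp) (Nat.le_of_succ_le hle)).symm
        simp only [dfsMemo, hmemo, hm]
        exact ⟨hfold.1.trans hcval.symm,
               memoGood_insert m _ c _ hfold.2 (hfold.1.trans hcval.symm)⟩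

-- ===== VERDICT (by name: the statement is the Claim_ definition above) =====
theorem crawler_spec : Claim_equal_crawler := by
  intro m child _ hpre
  show crawler m child = crawler_alt m child
  unfold crawler_alt
  have := dfsMemo_spec m (m.length + 1) (Nat.le_refl _) child PySem.Dict.empty
    hpre.2 (memoGood_empty m)
  exact this.1.symm
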